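-- pv_equiv track=rewrite | github.com/Ofigu/Recursive-Divide-and-Conquer-Algorithm | Matlat ritza 1.py | create_increasing_matrix
-- ===== SOURCE A (Python) =====
-- def create_increasing_matrix(size=50):
--     matrix = []
--     current_value = 1
--     for i in range(size):
--         row = []
--         for j in range(size):
--             row.append(current_value)
--             current_value += 1
--         matrix.append(row)
--     return matrix
-- ===== SOURCE B (Python) =====
-- def create_increasing_matrix(size=50):
--     return [list(range(i * size + 1, i * size + size + 1)) for i in range(size)]
-- ===== Notes on version B (the rewrite author's own statement) =====
-- stated objective: idiomatic
-- what changed: Each row is computed in closed form as a range determined solely by its row index, removing the running current_value counter and the inner append loop.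
import Mathlib
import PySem

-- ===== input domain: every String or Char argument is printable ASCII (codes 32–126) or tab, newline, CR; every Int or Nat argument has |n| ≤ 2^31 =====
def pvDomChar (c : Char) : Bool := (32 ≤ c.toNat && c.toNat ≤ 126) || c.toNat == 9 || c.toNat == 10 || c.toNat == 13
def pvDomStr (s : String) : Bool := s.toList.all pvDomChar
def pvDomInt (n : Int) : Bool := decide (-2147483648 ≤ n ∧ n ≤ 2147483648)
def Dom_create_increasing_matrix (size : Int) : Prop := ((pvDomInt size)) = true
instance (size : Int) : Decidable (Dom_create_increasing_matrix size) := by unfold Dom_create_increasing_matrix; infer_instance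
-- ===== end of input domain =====

-- B computes each row in closed form from its row index (idiomatic comprehension),
-- instead of A's cell-by-cell running counter threaded across rows.

-- ===== PORT A =====
-- inner loop: for j in range(size): row.append(current_value); current_value += 1
-- range(size) iterates max(size,0) times, hence recursion over the Nat size.toNat.
def pvAInner (n : Nat) (row : List Int) (cur : Int) : List Int × Int :=
  match n with
  | 0 => (row, cur)
  | k + 1 => pvAInner k (row ++ [cur]) (cur + 1)

-- outer loop: for i in range(size): run the inner loop on a fresh row, append it
def pvAOuter (m sz : Nat) (matrix : List (List Int)) (cur : Int) : List (List Int) × Int :=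
  match m with
  | 0 => (matrix, cur)
  | k + 1 =>
    let r := pvAInner sz [] cur
    pvAOuter k sz (matrix ++ [r.1]) r.2

def create_increasing_matrix (size : Int) : List (List Int) :=
  (pvAOuter size.toNat size.toNat [] 1).1

-- ===== PORT B =====
-- [list(range(i*size+1, i*size+size+1)) for i in range(size)]
def create_increasing_matrix_alt (size : Int) : List (List Int) :=
  (PySem.List.pyRange 0 size 1).map
    (fun i => PySem.List.pyRange (i * size + 1) (i * size + size + 1) 1)

-- ===== PRECONDITION & SPEC =====
def Spec_create_increasing_matrix (size : Int) (out : List (List Int)) : Prop := out = create_increasing_matrix_alt size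
instance (size : Int) (out : List (List Int)) : Decidable (Spec_create_increasing_matrix size out) := by unfold Spec_create_increasing_matrix; infer_instance

-- ===== CLAIM (what is proved, stated in full; the proofs are below) =====
def Claim_equal_create_increasing_matrix : Prop := ∀ (size : Int), Dom_create_increasing_matrix size → Spec_create_increasing_matrix size (create_increasing_matrix size)

-- ===== LEMMAS AND PROOFS =====

theorem pvAInner_eq (n : Nat) (row : List Int) (cur : Int) :
    pvAInner n row cur = (row ++ PySem.List.pyRange cur (cur + (n : Int)) 1, cur + (n : Int)) := by
  induction n generalizing row cur with
  | zero => simp [pvAInner, PySem.List.pyRange_one_eq_nil]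
  | succ k ih =>
    rw [pvAInner, ih]
    have h1 : cur < cur + ((k : Int) + 1) := by omega
    have h2 : cur + ((k + 1 : Nat) : Int) = cur + ((k : Int) + 1) := by push_cast; ring
    rw [h2, PySem.List.pyRange_one_cons h1]
    simp only [Prod.mk.injEq]
    refine ⟨?_, by ring⟩
    rw [List.append_assoc, List.singleton_append]
    congr 2
    ring_nf
theorem pvAOuter_eq (m sz : Nat) (matrix : List (List Int)) (cur : Int) :
    pvAOuter m sz matrix cur =
      (matrix ++ (List.range m).map
        (fun k : Nat => PySem.List.pyRange (cur + (k : Int) * (sz : Int)) (cur + (k : Int) * (sz : Int) + (sz : Int)) 1),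
       cur + (m : Int) * (sz : Int)) := by
  induction m generalizing matrix cur with
  | zero => simp [pvAOuter]
  | succ p ih =>
    rw [pvAOuter]
    simp only [pvAInner_eq]
    rw [ih]
    simp only [Prod.mk.injEq]
    refine ⟨?_, by push_cast; ring⟩
    rw [List.range_succ_eq_map, List.map_cons, List.map_map, List.append_assoc,
        List.singleton_append]
    have htail : ∀ a ∈ List.range p,
        PySem.List.pyRange (cur + (sz:Int) + (a:Int) * (sz:Int)) (cur + (sz:Int) + (a:Int) * (sz:Int) + (sz:Int)) 1
          = ((fun k : Nat => PySem.List.pyRange (cur + (k:Int) * (sz:Int)) (cur + (k:Int) * (sz:Int) + (sz:Int)) 1) ∘ Nat.succ) a := by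
      intro a _
      simp only [Function.comp, Nat.succ_eq_add_one]
      push_cast
      rw [show cur + (sz:Int) + (a:Int)*(sz:Int) = cur + ((a:Int)+1)*(sz:Int) from by ring]
    rw [List.map_congr_left htail]
    simp

theorem create_increasing_matrix_eq_alt (size : Int) :
    create_increasing_matrix size = create_increasing_matrix_alt size := by
  unfold create_increasing_matrix create_increasing_matrix_alt
  rw [pvAOuter_eq]
  simp only [List.nil_append]
  rw [PySem.List.pyRange_one, show size - 0 = size by ring, List.map_map]
  apply List.map_congr_left
  intro k hk
  simp only [Function.comp, zero_add]
  rcases le_or_gt size 0 with h | h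
  · rw [Int.toNat_of_nonpos h] at hk
    simp at hk
  · have hsz : (size.toNat : Int) = size := Int.toNat_of_nonneg (le_of_lt h)
    rw [hsz, show (1 : Int) + (k : Int) * size = (k : Int) * size + 1 from by ring,
        show (k : Int) * size + 1 + size = (k : Int) * size + size + 1 from by ring]

-- ===== VERDICT (by name: the statement is the Claim_ definition above) =====
theorem create_increasing_matrix_spec : Claim_equal_create_increasing_matrix := by
  intro size _
  exact create_increasing_matrix_eq_alt size
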